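-- pv_equiv track=rewrite | github.com/iSEE-Laboratory/Loc4Plan | instruction_preprocessing/instruction_split(map2seq).py | get_clear_action
-- ===== SOURCE A (Python) =====
-- def get_clear_action(node):
--     clear_action = None
--     direction_list = ["left", "right", "straight", "forward"]
--
--     for text, _ in node:
--         if text in direction_list:
--             clear_action = text
--     assert clear_action is not None
--     return clear_action
-- ===== SOURCE B (Python) =====
-- def get_clear_action(node):
--     directions = {"left", "right", "straight", "forward"}
--     for text, _ in reversed(node):
--         if text in directions:
--             return text
--     raise AssertionError
-- ===== Notes on version B (the rewrite author's own statement) =====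
-- stated objective: simpler
-- what changed: Scans the nodes in reverse and returns the first direction keyword found (early exit), instead of a full forward pass maintaining a last-wins variable.
import Mathlib
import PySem

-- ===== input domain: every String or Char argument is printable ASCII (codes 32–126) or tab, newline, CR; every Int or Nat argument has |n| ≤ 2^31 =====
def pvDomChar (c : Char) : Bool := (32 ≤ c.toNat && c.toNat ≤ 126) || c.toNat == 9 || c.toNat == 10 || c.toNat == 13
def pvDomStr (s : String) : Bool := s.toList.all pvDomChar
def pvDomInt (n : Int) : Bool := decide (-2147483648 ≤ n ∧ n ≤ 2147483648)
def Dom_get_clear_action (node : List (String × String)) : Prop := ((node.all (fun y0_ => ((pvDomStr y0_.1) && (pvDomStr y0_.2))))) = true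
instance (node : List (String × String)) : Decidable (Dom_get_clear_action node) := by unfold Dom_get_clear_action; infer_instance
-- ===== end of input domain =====

-- B is simpler: it scans the nodes in reverse and returns the first direction keyword
-- (early exit) instead of a forward pass keeping a last-wins variable; both raise
-- AssertionError when no direction occurs (excluded by Pre_).

-- ===== PORT A =====
-- forward fold keeping the last matching text in an Option accumulator;
-- the final `.getD ""` stands for the assert (Pre_ excludes the none case, where Python raises).
def get_clear_action (node : List (String × String)) : String :=
  let direction_list : List String := ["left", "right", "straight", "forward"]
  let clear_action : Option String :=
    node.foldl (fun acc p => if p.1 ∈ direction_list then some p.1 else acc) none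
  clear_action.getD ""

-- ===== PORT B =====
-- first match in the reversed list, early exit; "" stands for the raise (excluded by Pre_).
def pvRevFind : List (String × String) → String
  | [] => ""
  | p :: rest =>
      if p.1 ∈ ({"left", "right", "straight", "forward"} : Finset String) then p.1
      else pvRevFind rest

def get_clear_action_alt (node : List (String × String)) : String :=
  pvRevFind node.reverse

-- ===== PRECONDITION & SPEC =====
-- Pre_ excludes inputs with no direction keyword, where both Pythons raise AssertionError.
def Pre_get_clear_action (node : List (String × String)) : Prop :=
  ∃ p ∈ node, p.1 ∈ (["left", "right", "straight", "forward"] : List String)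
instance (node : List (String × String)) : Decidable (Pre_get_clear_action node) := by
  unfold Pre_get_clear_action; infer_instance
def pvWitness_get_clear_action : (List (String × String)) := [("left", "x")]

def Spec_get_clear_action (node : List (String × String)) (out : String) : Prop := out = get_clear_action_alt node
instance (node : List (String × String)) (out : String) : Decidable (Spec_get_clear_action node out) := by unfold Spec_get_clear_action; infer_instance

-- ===== CLAIM (what is proved, stated in full; the proofs are below) =====
def Claim_equal_get_clear_action : Prop := ∀ (node : List (String × String)), Dom_get_clear_action node → Pre_get_clear_action node → Spec_get_clear_action node (get_clear_action node)

-- ===== LEMMAS AND PROOFS =====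

-- first matching direction of a list, as an Option (proof-side characterisation)
def pvFirstDir : List (String × String) → Option String
  | [] => none
  | p :: rest =>
      if p.1 ∈ (["left", "right", "straight", "forward"] : List String) then some p.1
      else pvFirstDir rest

theorem pvFirstDir_append (a b : List (String × String)) :
    pvFirstDir (a ++ b) = (pvFirstDir a).orElse (fun _ => pvFirstDir b) := by
  induction a with
  | nil => simp [pvFirstDir]
  | cons p rest ih =>
      simp only [List.cons_append, pvFirstDir]
      split <;> simp [ih]

theorem pvFoldl_eq_firstDir_rev (node : List (String × String)) (acc : Option String) :
    node.foldl (fun acc p =>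
        if p.1 ∈ (["left", "right", "straight", "forward"] : List String) then some p.1 else acc) acc
      = ((pvFirstDir node.reverse).orElse (fun _ => acc)) := by
  induction node generalizing acc with
  | nil => simp [pvFirstDir]
  | cons p rest ih =>
      simp only [List.foldl_cons, List.reverse_cons, ih, pvFirstDir_append, pvFirstDir]
      cases h : pvFirstDir rest.reverse <;> split <;> simp [Option.orElse]

theorem pvRevFind_eq_firstDir (l : List (String × String)) :
    pvRevFind l = (pvFirstDir l).getD "" := by
  induction l with
  | nil => simp [pvRevFind, pvFirstDir]
  | cons p rest ih =>
      simp only [pvRevFind, pvFirstDir]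
      by_cases h : p.1 ∈ (["left", "right", "straight", "forward"] : List String)
      · rw [if_pos h, if_pos (by simpa using h)]; rfl
      · rw [if_neg h, if_neg (by simpa using h), ih]

-- ===== VERDICT (by name: the statement is the Claim_ definition above) =====
theorem get_clear_action_spec : Claim_equal_get_clear_action := by
  intro node _ _
  show (node.foldl (fun acc p =>
      if p.1 ∈ (["left", "right", "straight", "forward"] : List String) then some p.1 else acc)
      none).getD "" = pvRevFind node.reverse
  rw [pvRevFind_eq_firstDir, pvFoldl_eq_firstDir_rev]
  cases h : pvFirstDir node.reverse <;> simp [Option.orElse]
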